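-- pv_equiv track=rewrite | github.com/yacine-baghli/Python-Secret-Message-Deocder | decode_function.py | derniers_nombre_triangle
-- ===== SOURCE A (Python) =====
-- def derniers_nombre_triangle(max_nombre):
--     dereniers_nombres = []
--
--     nombre = 0
--
--     while nombre < max_nombre:
--         ligne_nombre = len(dereniers_nombres) + 1
--         premier_nombre = (ligne_nombre * (ligne_nombre - 1)) // 2 + 1
--         dernier_nombre = premier_nombre + ligne_nombre - 1
--         dereniers_nombres.append(dernier_nombre)
--         nombre = dernier_nombre
--
--     return dereniers_nombres
-- ===== SOURCE B (Python) =====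
-- import math
--
-- def derniers_nombre_triangle(max_nombre):
--     # Closed-form count of rows: smallest n with n*(n+1)//2 >= max_nombre,
--     # computed with integer isqrt, then one comprehension pass.
--     if max_nombre <= 0:
--         return []
--     s = math.isqrt(8 * max_nombre + 1)
--     if s * s == 8 * max_nombre + 1:
--         n = (s - 1) // 2
--     else:
--         n = (s - 1) // 2 + 1
--     return [i * (i + 1) // 2 for i in range(1, n + 1)]
-- ===== Notes on version B (the rewrite author's own statement) =====
-- stated objective: alternative
-- what changed: Replaces A's condition-checked accumulation while-loop with a closed-form row count via math.isqrt(8*m+1) followed by a single comprehension generating the triangular numbers.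
import Mathlib
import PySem

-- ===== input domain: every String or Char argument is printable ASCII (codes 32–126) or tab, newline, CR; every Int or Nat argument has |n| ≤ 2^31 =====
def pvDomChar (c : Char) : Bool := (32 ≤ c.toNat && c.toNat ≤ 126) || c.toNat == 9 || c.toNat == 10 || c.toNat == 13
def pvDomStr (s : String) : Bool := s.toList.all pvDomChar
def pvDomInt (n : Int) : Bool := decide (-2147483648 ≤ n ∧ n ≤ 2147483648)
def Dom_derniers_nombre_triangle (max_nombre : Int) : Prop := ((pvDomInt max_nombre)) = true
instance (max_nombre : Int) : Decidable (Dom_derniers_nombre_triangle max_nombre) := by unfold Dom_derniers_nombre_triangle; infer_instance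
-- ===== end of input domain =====

-- B replaces A's condition-checked accumulation loop by a closed-form row count
-- (integer square root of 8*m+1) followed by one generation pass.

-- ===== PORT A =====
-- while-loop of A as recursion on a fuel counter (fuel only totalizes the loop;
-- max_nombre.toNat + 1 iterations always suffice, proved in the lemmas below)
def pvLoopA (max_nombre : Int) : Nat → List Int → Int → List Int
  | 0, acc, _ => acc
  | fuel+1, acc, nombre =>
    if nombre < max_nombre then
      let ligne : Int := (acc.length : Int) + 1
      let premier : Int := PySem.Int.floordiv (ligne * (ligne - 1)) 2 + 1
      let dernier : Int := premier + ligne - 1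
      pvLoopA max_nombre fuel (acc ++ [dernier]) dernier
    else acc

def derniers_nombre_triangle (max_nombre : Int) : List Int :=
  pvLoopA max_nombre (max_nombre.toNat + 1) [] 0

-- ===== PORT B =====
def derniers_nombre_triangle_alt (max_nombre : Int) : List Int :=
  if max_nombre ≤ 0 then []
  else
    let s : Int := ((8 * max_nombre + 1).toNat.sqrt : Int)   -- math.isqrt(8*m+1)
    let n : Int :=
      if s * s = 8 * max_nombre + 1 then PySem.Int.floordiv (s - 1) 2
      else PySem.Int.floordiv (s - 1) 2 + 1
    (PySem.List.pyRange 1 (n + 1) 1).map (fun i => PySem.Int.floordiv (i * (i + 1)) 2)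

-- ===== PRECONDITION & SPEC =====
def Spec_derniers_nombre_triangle (max_nombre : Int) (out : List Int) : Prop := out = derniers_nombre_triangle_alt max_nombre
instance (max_nombre : Int) (out : List Int) : Decidable (Spec_derniers_nombre_triangle max_nombre out) := by unfold Spec_derniers_nombre_triangle; infer_instance

-- ===== CLAIM (what is proved, stated in full; the proofs are below) =====
def Claim_equal_derniers_nombre_triangle : Prop := ∀ (max_nombre : Int), Dom_derniers_nombre_triangle max_nombre → Spec_derniers_nombre_triangle max_nombre (derniers_nombre_triangle max_nombre)

-- ===== LEMMAS AND PROOFS =====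

-- triangular numbers
def triN : Nat → Nat
  | 0 => 0
  | k+1 => triN k + (k+1)

lemma two_mul_triN (k : Nat) : 2 * triN k = k * (k+1) := by
  induction k with
  | zero => rfl
  | succ k ih =>
    have e : (k+1)*(k+2) = k*(k+1) + 2*(k+1) := by ring
    simp only [triN]
    linarith

lemma triN_lt_triN {j k : Nat} (h : j < k) : triN j < triN k := by
  have h1 := two_mul_triN j
  have h2 := two_mul_triN k
  have hb : j*(j+1) < k*(k+1) := by nlinarith
  omega

lemma triN_le_triN {j k : Nat} (h : j ≤ k) : triN j ≤ triN k := by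
  rcases Nat.lt_or_ge j k with h' | h'
  · exact le_of_lt (triN_lt_triN h')
  · have : j = k := le_antisymm h h'
    simp [this]

lemma self_le_triN (k : Nat) : k ≤ triN k := by
  induction k with
  | zero => simp [triN]
  | succ k ih => simp only [triN]; omega

-- [T 1, …, T k]
def pvAcc (k : Nat) : List Int := (List.range' 1 k).map (fun i => (triN i : Int))

lemma pvAcc_succ (k : Nat) : pvAcc (k+1) = pvAcc k ++ [(triN (k+1) : Int)] := by
  unfold pvAcc
  rw [List.range'_concat]
  simp [Nat.add_comm]

lemma pvAcc_length (k : Nat) : (pvAcc k).length = k := by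
  unfold pvAcc; simp

lemma floordiv_tri (k : Nat) : PySem.Int.floordiv (((k:Int)+1) * k) 2 + (((k:Int))+1) = (triN (k+1) : Int) := by
  have h : (((k:Int))+1) * k = (((k+1)*k : Nat) : Int) := by push_cast; ring
  rw [h, show ((2:Int)) = ((2:Nat):Int) from rfl, PySem.Int.floordiv_natCast]
  have h2 := two_mul_triN k
  have h3 : (k+1)*k = k*(k+1) := Nat.mul_comm _ _
  have h4 : (k+1)*k / 2 = triN k := by
    rw [h3]; generalize k*(k+1) = a at h2 ⊢; omega
  rw [h4]
  have : triN (k+1) = triN k + (k+1) := rfl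
  push_cast [this]; ring

lemma tri_exists (m : Int) : ∃ n, m ≤ (triN n : Int) := by
  refine ⟨m.toNat, ?_⟩
  have h1 : m ≤ (m.toNat : Int) := Int.self_le_toNat m
  have h2 := self_le_triN m.toNat
  omega

-- the loop builds pvAcc up to the least n with m ≤ T n
lemma loop_eq (m : Int) (fuel : Nat) : ∀ (k : Nat),
    k ≤ Nat.find (tri_exists m) → Nat.find (tri_exists m) ≤ k + fuel →
    pvLoopA m fuel (pvAcc k) (triN k) = pvAcc (Nat.find (tri_exists m)) := by
  induction fuel with
  | zero =>
    intro k hk hfuel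
    have : k = Nat.find (tri_exists m) := by omega
    simp [pvLoopA, this]
  | succ fuel ih =>
    intro k hk hfuel
    by_cases h : (triN k : Int) < m
    · have hkN : k < Nat.find (tri_exists m) := by
        rcases Nat.lt_or_ge k (Nat.find (tri_exists m)) with h' | h'
        · exact h'
        · exfalso
          have := Nat.find_spec (tri_exists m)
          have hmono := triN_le_triN h'
          have : m ≤ (triN k : Int) := by
            calc m ≤ (triN (Nat.find (tri_exists m)) : Int) := this
            _ ≤ (triN k : Int) := by exact_mod_cast hmono
          omega
      have hd : PySem.Int.floordiv ((((pvAcc k).length : Int) + 1) * (((pvAcc k).length : Int) + 1 - 1)) 2 + 1 + (((pvAcc k).length : Int) + 1) - 1 = (triN (k+1) : Int) := by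
        rw [pvAcc_length]
        have := floordiv_tri k
        have e : ((k:Int)+1-1) = (k:Int) := by ring
        rw [e]
        omega
      simp only [pvLoopA, if_pos h]
      rw [hd, ← pvAcc_succ]
      exact ih (k+1) (by omega) (by omega)
    · have hNk : Nat.find (tri_exists m) ≤ k := Nat.find_min' _ (by omega)
      have hke : k = Nat.find (tri_exists m) := by omega
      subst hke
      simp only [pvLoopA]
      rw [if_neg h]

lemma A_eq (m : Int) : derniers_nombre_triangle m = pvAcc (Nat.find (tri_exists m)) := by
  have hN : Nat.find (tri_exists m) ≤ m.toNat := by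
    apply Nat.find_min'
    have h1 : m ≤ (m.toNat : Int) := Int.self_le_toNat m
    have h2 := self_le_triN m.toNat
    omega
  have h0 : pvAcc 0 = [] := rfl
  have ht0 : (triN 0 : Int) = 0 := rfl
  unfold derniers_nombre_triangle
  rw [← h0, ← ht0]
  exact loop_eq m (m.toNat + 1) 0 (by omega) (by omega)

-- B's generation pass produces pvAcc
lemma range_map_eq (n : Nat) :
    (PySem.List.pyRange 1 ((n:Int) + 1) 1).map (fun i => PySem.Int.floordiv (i * (i + 1)) 2) = pvAcc n := by
  induction n with
  | zero => simp [PySem.List.pyRange_one_eq_nil, pvAcc]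
  | succ n ih =>
    have h : PySem.List.pyRange 1 ((n:Int) + 1 + 1) 1 = PySem.List.pyRange 1 ((n:Int) + 1) 1 ++ [(n:Int) + 1] := by
      exact PySem.List.pyRange_one_succ_right (by omega)
    have e : ((n+1:Nat):Int) + 1 = (n:Int) + 1 + 1 := by push_cast; ring
    rw [e, h, List.map_append, ih, pvAcc_succ]
    congr 1
    simp only [List.map]
    congr 1
    have := floordiv_tri n
    have e2 : ((n:Int)+1) * ((n:Int)+1+1) = ((n:Int)+1+1) * ((n:Int)+1) := by ring
    -- floordiv ((n+1)*(n+2)) 2 = triN (n+2) - (n+2)?  use floordiv_tri at n+1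
    have h3 := floordiv_tri (n+1)
    have e3 : (((n+1:Nat):Int)+1) * ((n+1:Nat):Int) = ((n:Int)+1) * ((n:Int)+1+1) := by push_cast; ring
    rw [e3] at h3
    have e4 : (((n+1:Nat):Int)+1) = (n:Int)+2 := by push_cast; ring
    rw [e4] at h3
    have e5 : (triN (n+1+1) : Int) = (triN (n+1) : Int) + ((n:Int)+2) := by
      have : triN (n+1+1) = triN (n+1) + (n+2) := rfl
      push_cast [this]; ring
    omega

lemma nat_sqrt_facts (K : Nat) : Nat.sqrt K * Nat.sqrt K ≤ K ∧ K < (Nat.sqrt K + 1) * (Nat.sqrt K + 1) := by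
  constructor
  · have := Nat.sqrt_le' K
    nlinarith
  · have := Nat.lt_succ_sqrt' K
    nlinarith

lemma B_eq (m : Int) : derniers_nombre_triangle_alt m = pvAcc (Nat.find (tri_exists m)) := by
  by_cases hm : m ≤ 0
  · have hN : Nat.find (tri_exists m) = 0 := by
      have h0 : m ≤ (triN 0 : Int) := by show m ≤ ((0:Nat):Int); omega
      have := Nat.find_min' (tri_exists m) h0
      omega
    simp [derniers_nombre_triangle_alt, if_pos hm, hN, pvAcc]
  · have hm' : 0 < m := by omega
    set M := m.toNat with hM
    have hmM : m = (M : Int) := by omega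
    have hM1 : 1 ≤ M := by omega
    clear hm
    have hKt : (8 * m + 1).toNat = 8 * M + 1 := by omega
    set sN := Nat.sqrt (8 * M + 1) with hsN
    obtain ⟨hs1, hs2⟩ := nat_sqrt_facts (8 * M + 1)
    rw [← hsN] at hs1 hs2
    have hs3 : 3 ≤ sN := by
      have h9 : 9 ≤ 8 * M + 1 := by omega
      rw [hsN]
      exact Nat.le_sqrt.mpr (by omega)
    -- the row count B computes, as a Nat
    have key : ∀ nB : Nat,
        (m ≤ (triN nB : Int)) → (∀ j, j < nB → ¬ m ≤ (triN j : Int)) →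
        Nat.find (tri_exists m) = nB := by
      intro nB h1 h2
      rw [Nat.find_eq_iff]
      exact ⟨h1, h2⟩
    unfold derniers_nombre_triangle_alt
    rw [if_neg (by omega)]
    simp only [hKt, ← hsN]
    by_cases hsq : ((sN : Int)) * ((sN : Int)) = 8 * m + 1
    · -- exact square: sN is odd, n = (sN-1)/2 and T n = M exactly
      have hsqN : sN * sN = 8 * M + 1 := by
        have h' := hsq
        rw [hmM] at h'
        exact_mod_cast h'
      set t := (sN - 1) / 2 with ht
      have hodd : sN % 2 = 1 := by
        rcases Nat.even_or_odd sN with he | ho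
        · exfalso
          obtain ⟨u, hu⟩ := he
          have : (u + u) * (u + u) = 8 * M + 1 := by rw [← hu]; exact hsqN
          have h4 : 4 * (u * u) = 8 * M + 1 := by nlinarith
          omega
        · obtain ⟨u, hu⟩ := ho
          omega
      have hst : sN = 2 * t + 1 := by omega
      have htri : triN t = M := by
        have h2t := two_mul_triN t
        have : (2*t+1) * (2*t+1) = 8 * M + 1 := by rw [← hst]; exact hsqN
        nlinarith
      have hfd : PySem.Int.floordiv ((sN : Int) - 1) 2 = (t : Int) := by
        have e : (sN : Int) - 1 = ((sN - 1 : Nat) : Int) := by omega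
        rw [e, show ((2:Int)) = ((2:Nat):Int) from rfl, PySem.Int.floordiv_natCast]
      rw [if_pos hsq, hfd]
      rw [key t (by rw [htri]; omega) ?_]
      · exact range_map_eq t
      · intro j hj
        have := triN_lt_triN hj
        rw [htri] at this
        omega
    · -- not a square: n = (sN-1)/2 + 1 is the least n with 2n ≥ sN
      have hlt : sN * sN < 8 * M + 1 := by
        rcases Nat.lt_or_ge (sN * sN) (8 * M + 1) with h | h
        · exact h
        · exfalso
          apply hsq
          have h' : sN * sN = 8 * M + 1 := by omega
          rw [hmM]
          exact_mod_cast h'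
      set nB := (sN - 1) / 2 + 1 with hnB
      have hb1 : sN ≤ 2 * nB := by omega
      have hb2 : 2 * nB ≤ sN + 1 := by omega
      have hfd : PySem.Int.floordiv ((sN : Int) - 1) 2 + 1 = (nB : Int) := by
        have e : (sN : Int) - 1 = ((sN - 1 : Nat) : Int) := by omega
        rw [e, show ((2:Int)) = ((2:Nat):Int) from rfl, PySem.Int.floordiv_natCast]
        push_cast [hnB]; ring
      rw [if_neg hsq, hfd]
      have h1 : m ≤ (triN nB : Int) := by
        have h2t := two_mul_triN nB
        have hsq1 : (sN + 1) * (sN + 1) ≤ (2 * nB + 1) * (2 * nB + 1) :=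
          Nat.mul_le_mul (by omega) (by omega)
        have : 2 * M ≤ nB * (nB + 1) := by nlinarith
        omega
      rw [key nB h1 ?_]
      · exact range_map_eq nB
      · intro j hj
        have h2t := two_mul_triN j
        have hjb : 2 * j + 1 ≤ sN := by omega
        have hsq1 : (2 * j + 1) * (2 * j + 1) ≤ sN * sN :=
          Nat.mul_le_mul hjb hjb
        have : j * (j + 1) < 2 * M := by nlinarith
        omega

-- ===== VERDICT (by name: the statement is the Claim_ definition above) =====
theorem derniers_nombre_triangle_spec : Claim_equal_derniers_nombre_triangle := by
  intro m _
  unfold Spec_derniers_nombre_triangle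
  rw [A_eq, B_eq]
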